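-- pv_equiv track=rewrite | github.com/Ron3519/DZ_Urban | module2hard.py | save_program
-- ===== SOURCE A (Python) =====
-- def save_program(boss_num):
--     numbers = []
--     final = ''
--     for i in range(2, boss_num + 1):
--         if boss_num % i == 0:
--             numbers.append(i)
--
--     for i in numbers:
--         x = 1
--         if i % 2 == 0:
--             x = 0
--         for j in range(1, i // 2 + x):
--             final += str(j) + str(i - j) + '  '
--
--     return final
-- ===== SOURCE B (Python) =====
-- def save_program(boss_num):
--     divs = set()
--     i = 1
--     while i * i <= boss_num:
--         if boss_num % i == 0:
--             divs.add(i)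
--             divs.add(boss_num // i)
--         i += 1
--     parts = []
--     for d in sorted(divs):
--         if d >= 2:
--             x = 0 if d % 2 == 0 else 1
--             for j in range(1, d // 2 + x):
--                 parts.append(str(j) + str(d - j) + '  ')
--     return ''.join(parts)
-- ===== Notes on version B (the rewrite author's own statement) =====
-- stated objective: alternative
-- what changed: Divisors are enumerated by trial division up to sqrt(n) into a set (collecting both i and n//i) and then sorted, instead of scanning every i in 2..n; the pair strings are collected in a list and joined once instead of repeated string concatenation.
import Mathlib
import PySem

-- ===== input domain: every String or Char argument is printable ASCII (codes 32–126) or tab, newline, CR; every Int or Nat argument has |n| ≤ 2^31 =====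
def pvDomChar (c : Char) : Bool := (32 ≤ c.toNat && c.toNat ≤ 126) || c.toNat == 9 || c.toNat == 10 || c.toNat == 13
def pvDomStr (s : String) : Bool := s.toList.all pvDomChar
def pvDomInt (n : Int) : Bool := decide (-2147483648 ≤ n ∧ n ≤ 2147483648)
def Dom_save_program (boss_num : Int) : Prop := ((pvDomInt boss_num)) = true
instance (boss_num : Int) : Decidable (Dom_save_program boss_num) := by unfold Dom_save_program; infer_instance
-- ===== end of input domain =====

-- B replaces A's full divisor scan by sqrt(n) trial division into a set, sorted afterwards,
-- and joins collected pair strings once instead of repeated concatenation (objective: alternative).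

-- ===== PORT A =====
def save_program (boss_num : Int) : String :=
  let numbers : List Int :=
    (PySem.List.pyRange 2 (boss_num + 1) 1).foldl
      (fun acc i => if PySem.Int.mod boss_num i == 0 then acc ++ [i] else acc) []
  let final : List Char :=
    numbers.foldl (fun final i =>
      let x : Int := if PySem.Int.mod i 2 == 0 then 0 else 1
      (PySem.List.pyRange 1 (PySem.Int.floordiv i 2 + x) 1).foldl
        (fun f j => f ++ PySem.Int.toChars j ++ PySem.Int.toChars (i - j) ++ "  ".toList) final) []
  String.ofList final

-- ===== PORT B =====
-- the 'while i * i <= boss_num' loop of Source B; termination: i*i ≤ n forces i ≤ n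
def pvCollectDivs (boss_num : Int) (i : Int) (divs : PySem.Set Int) : PySem.Set Int :=
  if h : i * i ≤ boss_num then
    let divs' := if PySem.Int.mod boss_num i == 0 then
        PySem.Set.add (PySem.Set.add divs i) (PySem.Int.floordiv boss_num i)
      else divs
    pvCollectDivs boss_num (i + 1) divs'
  else divs
termination_by (boss_num + 1 - i).toNat
decreasing_by
  have hii : i ≤ i * i := by nlinarith [mul_self_nonneg (i - 1)]
  omega

def save_program_alt (boss_num : Int) : String :=
  let divs : PySem.Set Int := pvCollectDivs boss_num 1 PySem.Set.empty
  let parts : List (List Char) :=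
    (PySem.List.sorted divs (fun x => x) false).foldl
      (fun parts d =>
        if 2 ≤ d then
          let x : Int := if PySem.Int.mod d 2 == 0 then 0 else 1
          (PySem.List.pyRange 1 (PySem.Int.floordiv d 2 + x) 1).foldl
            (fun ps j => ps ++ [PySem.Int.toChars j ++ PySem.Int.toChars (d - j) ++ "  ".toList]) parts
        else parts) []
  String.ofList (PySem.Chars.join [] parts)

-- ===== PRECONDITION & SPEC =====
def Spec_save_program (boss_num : Int) (out : String) : Prop := out = save_program_alt boss_num
instance (boss_num : Int) (out : String) : Decidable (Spec_save_program boss_num out) := by unfold Spec_save_program; infer_instance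

-- ===== CLAIM (what is proved, stated in full; the proofs are below) =====
def Claim_equal_save_program : Prop := ∀ (boss_num : Int), Dom_save_program boss_num → Spec_save_program boss_num (save_program boss_num)

-- ===== LEMMAS AND PROOFS =====
theorem mem_collect (n : Int) (i : Int) (s : PySem.Set Int) (hi : 1 ≤ i) (x : Int) :
    x ∈ pvCollectDivs n i s ↔
      x ∈ s ∨ ∃ j, i ≤ j ∧ j * j ≤ n ∧ PySem.Int.mod n j = 0 ∧
        (x = j ∨ x = PySem.Int.floordiv n j) := by
  induction i, s using pvCollectDivs.induct n with
  | case1 i s h d' ih =>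
    rw [pvCollectDivs]
    simp only [dif_pos h]
    simp only [d', dite_eq_ite] at ih
    rw [ih (by omega)]
    have hmem : (x ∈ if PySem.Int.mod n i == 0 then
        PySem.Set.add (PySem.Set.add s i) (PySem.Int.floordiv n i) else s) ↔
        x ∈ s ∨ (PySem.Int.mod n i = 0 ∧ (x = i ∨ x = PySem.Int.floordiv n i)) := by
      by_cases hm : PySem.Int.mod n i = 0
      · simp [hm, PySem.Set.mem_add]; tauto
      · simp [hm]
    rw [hmem]
    constructor
    · rintro ((hs | ⟨hm, hx⟩) | ⟨j, hj1, hj2, hj3, hj4⟩)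
      · exact Or.inl hs
      · exact Or.inr ⟨i, le_refl i, h, hm, hx⟩
      · exact Or.inr ⟨j, by omega, hj2, hj3, hj4⟩
    · rintro (hs | ⟨j, hj1, hj2, hj3, hj4⟩)
      · exact Or.inl (Or.inl hs)
      · rcases eq_or_lt_of_le hj1 with rfl | hlt
        · exact Or.inl (Or.inr ⟨hj3, hj4⟩)
        · exact Or.inr ⟨j, by omega, hj2, hj3, hj4⟩
  | case2 i s h =>
    rw [pvCollectDivs]
    simp only [dif_neg h, iff_self_or]
    rintro ⟨j, hj1, hj2, hj3, hj4⟩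
    have hij : i * i ≤ j * j := by nlinarith
    omega

theorem nodup_collect (n : Int) (i : Int) (s : PySem.Set Int) (hs : s.Nodup) :
    (pvCollectDivs n i s).Nodup := by
  induction i, s using pvCollectDivs.induct n with
  | case1 i s h d' ih =>
    rw [pvCollectDivs]
    simp only [dif_pos h]
    apply ih
    simp only [d', dite_eq_ite]
    split
    · exact PySem.Set.nodup_add _ _ (PySem.Set.nodup_add _ _ hs)
    · exact hs
  | case2 i s h =>
    rw [pvCollectDivs]
    simp only [dif_neg h]
    exact hs

theorem collect_divisors (n x : Int) :
    x ∈ pvCollectDivs n 1 PySem.Set.empty ↔ (1 ≤ x ∧ x ≤ n ∧ PySem.Int.mod n x = 0) := by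
  rw [mem_collect n 1 _ le_rfl]
  simp only [PySem.Set.empty, List.not_mem_nil, false_or]
  constructor
  · rintro ⟨j, hj1, hj2, hj0, (rfl | rfl)⟩
    · exact ⟨hj1, by nlinarith, hj0⟩
    · have hjd : j ∣ n := (PySem.Int.mod_eq_zero_iff_dvd n j).mp hj0
      obtain ⟨k, rfl⟩ := hjd
      rw [PySem.Int.floordiv_eq_ediv_of_pos (by omega : (0:Int) < j),
        Int.mul_ediv_cancel_left k (by omega : j ≠ 0)]
      have hk1 : 1 ≤ k := by nlinarith
      exact ⟨hk1, by nlinarith, (PySem.Int.mod_eq_zero_iff_dvd _ _).mpr ⟨j, by ring⟩⟩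
  · rintro ⟨hx1, hxn, hx0⟩
    have hxd : x ∣ n := (PySem.Int.mod_eq_zero_iff_dvd n x).mp hx0
    obtain ⟨k, hk⟩ := hxd
    have hk1 : 1 ≤ k := by nlinarith
    by_cases hxx : x * x ≤ n
    · exact ⟨x, hx1, hxx, hx0, Or.inl rfl⟩
    · refine ⟨k, hk1, by nlinarith,
        (PySem.Int.mod_eq_zero_iff_dvd _ _).mpr ⟨x, by rw [hk]; ring⟩, Or.inr ?_⟩
      rw [PySem.Int.floordiv_eq_ediv_of_pos (by omega : (0:Int) < k), hk, mul_comm,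
        Int.mul_ediv_cancel_left x (by omega : k ≠ 0)]

theorem sorted_divs (n : Int) :
    PySem.List.sorted (pvCollectDivs n 1 PySem.Set.empty) (fun x => x) false
      = (PySem.List.pyRange 1 (n+1) 1).filter (fun i => PySem.Int.mod n i == 0) := by
  apply PySem.List.sorted_eq_of_perm_of_pairwise_lt
  · rw [List.perm_ext_iff_of_nodup
      (List.Nodup.filter _ (PySem.List.nodup_pyRange_one 1 (n+1)))
      (nodup_collect n 1 PySem.Set.empty (by simp [PySem.Set.empty]))]
    intro a
    rw [List.mem_filter, PySem.List.mem_pyRange_one, collect_divisors]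
    simp only [beq_iff_eq]
    constructor
    · rintro ⟨⟨h1, h2⟩, h3⟩; exact ⟨h1, by omega, h3⟩
    · rintro ⟨h1, h2, h3⟩; exact ⟨⟨h1, by omega⟩, h3⟩
  · exact (PySem.List.pairwise_lt_pyRange_one 1 (n+1)).filter _

theorem numbers_eq (n : Int) :
    ((PySem.List.pyRange 1 (n+1) 1).filter (fun i => PySem.Int.mod n i == 0)).filter
        (fun d => decide (2 ≤ d))
      = (PySem.List.pyRange 2 (n+1) 1).filter (fun i => PySem.Int.mod n i == 0) := by
  rw [List.filter_filter]
  by_cases hn : 1 ≤ n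
  · rw [PySem.List.pyRange_one_cons (by omega : (1:Int) < n+1)]
    rw [List.filter_cons_of_neg (by simp)]
    apply List.filter_congr
    intro x hx
    rw [PySem.List.mem_pyRange_one] at hx
    simp [show (2:Int) ≤ x by omega]
  · rw [PySem.List.pyRange_one_eq_nil (by omega : n+1 ≤ 1),
        PySem.List.pyRange_one_eq_nil (by omega : n+1 ≤ 2)]
    rfl

def pvG (d j : Int) : List Char :=
  PySem.Int.toChars j ++ PySem.Int.toChars (d - j) ++ "  ".toList

def pvInner (d : Int) : List Int :=
  PySem.List.pyRange 1 (PySem.Int.floordiv d 2 + (if PySem.Int.mod d 2 == 0 then 0 else 1)) 1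

theorem lemA (numbers : List Int) :
    numbers.foldl (fun final i =>
        let x : Int := if PySem.Int.mod i 2 == 0 then 0 else 1
        (PySem.List.pyRange 1 (PySem.Int.floordiv i 2 + x) 1).foldl
          (fun f j => f ++ PySem.Int.toChars j ++ PySem.Int.toChars (i - j) ++ "  ".toList) final) []
      = numbers.flatMap (fun d => (pvInner d).flatMap (pvG d)) := by
  have h1 := PySem.List.foldl_congr_mem numbers
    (fun final i =>
        let x : Int := if PySem.Int.mod i 2 == 0 then 0 else 1
        (PySem.List.pyRange 1 (PySem.Int.floordiv i 2 + x) 1).foldl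
          (fun f j => f ++ PySem.Int.toChars j ++ PySem.Int.toChars (i - j) ++ "  ".toList) final)
    (fun final i => final ++ (pvInner i).flatMap (pvG i)) []
    (by intro acc i _
        simp only [pvInner]
        rw [← PySem.List.foldl_append_eq_flatMap]
        exact PySem.List.foldl_congr_mem _ _ _ _ (by intro f _ _; simp [pvG, List.append_assoc]))
  rw [h1, PySem.List.foldl_append_eq_flatMap]
  simp

theorem lemB (ds : List Int) :
    ds.foldl (fun parts d =>
        if 2 ≤ d then
          let x : Int := if PySem.Int.mod d 2 == 0 then 0 else 1
          (PySem.List.pyRange 1 (PySem.Int.floordiv d 2 + x) 1).foldl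
            (fun ps j => ps ++ [PySem.Int.toChars j ++ PySem.Int.toChars (d - j) ++ "  ".toList]) parts
        else parts) []
      = ds.flatMap (fun d => if 2 ≤ d then (pvInner d).map (pvG d) else []) := by
  have h1 := PySem.List.foldl_congr_mem ds
    (fun parts d =>
        if 2 ≤ d then
          let x : Int := if PySem.Int.mod d 2 == 0 then 0 else 1
          (PySem.List.pyRange 1 (PySem.Int.floordiv d 2 + x) 1).foldl
            (fun ps j => ps ++ [PySem.Int.toChars j ++ PySem.Int.toChars (d - j) ++ "  ".toList]) parts
        else parts)
    (fun parts d => parts ++ (if 2 ≤ d then (pvInner d).map (pvG d) else [])) []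
    (by intro acc d _
        by_cases hd : 2 ≤ d
        · simp only [if_pos hd, pvInner]
          exact PySem.List.foldl_append_singleton_eq_map _ _ _
        · simp [if_neg hd])
  rw [h1, PySem.List.foldl_append_eq_flatMap]
  simp

theorem pvJoinNil (ps : List (List Char)) : PySem.Chars.join [] ps = ps.flatten := by
  induction ps with
  | nil => exact PySem.Chars.join_nil []
  | cons a t ih =>
    cases t with
    | nil => simp [PySem.Chars.join_singleton]
    | cons b u =>
      rw [PySem.Chars.join_cons_cons, ih]
      simp

theorem helperB (ds : List Int) :
    (ds.flatMap (fun d => if 2 ≤ d then (pvInner d).map (pvG d) else [])).flatten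
      = (ds.filter (fun d => decide (2 ≤ d))).flatMap (fun d => (pvInner d).flatMap (pvG d)) := by
  induction ds with
  | nil => rfl
  | cons a t ih =>
    rw [List.flatMap_cons, List.flatten_append]
    by_cases ha : 2 ≤ a
    · rw [if_pos ha, ih, List.filter_cons_of_pos (by simpa using ha), List.flatMap_cons,
        ← List.flatMap_def]
    · rw [if_neg ha, ih, List.filter_cons_of_neg (by simpa using ha)]
      simp


-- ===== VERDICT (by name: the statement is the Claim_ definition above) =====
theorem save_program_spec : Claim_equal_save_program := by
  intro n _
  unfold Spec_save_program save_program save_program_alt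
  simp only [PySem.List.foldl_append_if_eq_filter, List.nil_append]
  rw [lemA, lemB, sorted_divs n, pvJoinNil, helperB, numbers_eq]
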